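-- pv_equiv track=rewrite | github.com/pypi-data/pypi-mirror-55 | packages/emu86/emu86-0.0.8.1.tar.gz/emu86-0.0.8.1/kernels/mips_asm/kernel.py | has_one_data
-- ===== SOURCE A (Python) =====
-- def has_one_data(code):
--     lines = code.split("\n")
--     data_seg_count = 0
--     for line in lines:
--         if line == '':
--             continue
--         if line[0] == ';':
--             continue
--         else:
--             if line[:5] == ".data":
--                 data_seg_count += 1
--
--     if data_seg_count > 1:
--         return False
--     return True
-- ===== SOURCE B (Python) =====
-- def has_one_data(code):
--     pat = ".data"
--     hits = 0
--     k = 0  # 0-4: chars of pat matched on current line; 5: line counted; 6: line cannot match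
--     for ch in code:
--         if ch == "\n":
--             k = 0
--         elif k < 5:
--             if ch == pat[k]:
--                 k += 1
--                 if k == 5:
--                     hits += 1
--             else:
--                 k = 6
--     return hits <= 1
-- ===== Notes on version B (the rewrite author's own statement) =====
-- stated objective: alternative
-- what changed: B replaces A's split-into-lines-then-classify loop (whose comment/empty-line skip branches can never affect the count) by a single character-level state machine that matches the data-segment marker at each line start in one scan of the raw string.
import Mathlib
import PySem

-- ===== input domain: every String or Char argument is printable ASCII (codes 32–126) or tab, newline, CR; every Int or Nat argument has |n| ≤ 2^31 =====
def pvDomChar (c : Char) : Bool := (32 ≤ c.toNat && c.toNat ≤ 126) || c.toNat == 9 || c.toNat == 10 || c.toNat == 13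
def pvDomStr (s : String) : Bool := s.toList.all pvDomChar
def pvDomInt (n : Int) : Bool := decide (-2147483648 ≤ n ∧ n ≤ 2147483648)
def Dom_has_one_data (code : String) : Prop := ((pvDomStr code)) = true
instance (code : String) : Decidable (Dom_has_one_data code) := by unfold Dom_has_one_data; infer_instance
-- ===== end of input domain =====

-- B replaces A's split-into-lines-then-classify loop by a single character-level
-- matching pass (a small state machine) over the raw string; objective: alternative.

-- ===== PORT A =====
-- code.split("\n"): sep is the nonempty literal "\n", so Python never raises; split? = some (splitOn).
def has_one_data (code : String) : Bool :=
  let lines := PySem.Chars.splitOn code.toList "\n".toList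
  let c : Int := lines.foldl (fun acc line =>
    if line = [] then acc
    else if PySem.List.pyGet? line 0 = some ';' then acc
    else if PySem.Chars.slice line none (some 5) = ".data".toList then acc + 1
    else acc) 0
  if c > 1 then false else true

-- ===== PORT B =====
-- one step of B's scan: state = (hits so far, k = progress matching ".data" on the current line)
def hodStep (st : Int × Nat) (ch : Char) : Int × Nat :=
  if ch = '\n' then (st.1, 0)
  else if st.2 < 5 then
    -- ch == ".data"[k]; k < 5 so the index is in range
    if PySem.List.pyGet? ".data".toList (st.2 : Int) = some ch then
      (if st.2 + 1 = 5 then st.1 + 1 else st.1, st.2 + 1)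
    else (st.1, 6)
  else st

def has_one_data_alt (code : String) : Bool :=
  let r := code.toList.foldl hodStep (0, 0)
  decide (r.1 ≤ 1)

-- ===== PRECONDITION & SPEC =====
def Spec_has_one_data (code : String) (out : Bool) : Prop := out = has_one_data_alt code
instance (code : String) (out : Bool) : Decidable (Spec_has_one_data code out) := by unfold Spec_has_one_data; infer_instance

-- ===== CLAIM (what is proved, stated in full; the proofs are below) =====
def Claim_equal_has_one_data : Prop := ∀ (code : String), Dom_has_one_data code → Spec_has_one_data code (has_one_data code)

-- ===== LEMMAS AND PROOFS =====

-- split of a char list at newlines, structurally (proved equal to PySem.Chars.splitOn · ['\n'])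
def linesNl : List Char → List (List Char)
  | [] => [[]]
  | c :: t =>
    if c = '\n' then [] :: linesNl t
    else match linesNl t with
      | [] => [[c]]
      | L :: Ls => (c :: L) :: Ls

theorem linesNl_ne_nil (s : List Char) : linesNl s ≠ [] := by
  cases s with
  | nil => simp [linesNl]
  | cons c t => simp only [linesNl]; split <;> [skip; split] <;> simp

theorem splitOn_go_eq (l : List Char) : ∀ (fuel : Nat) (cur : List Char)
    (acc : List (List Char)), l.length ≤ fuel →
    PySem.Chars.splitOn.go ['\n'] fuel l cur acc =
      acc.reverse ++ (match linesNl l with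
        | [] => []
        | L :: Ls => (cur.reverse ++ L) :: Ls) := by
  induction l with
  | nil =>
    intro fuel cur acc _
    cases fuel <;> simp [PySem.Chars.splitOn.go, linesNl]
  | cons c t ih =>
    intro fuel cur acc hf
    cases fuel with
    | zero => simp at hf
    | succ f =>
      by_cases hc : c = '\n'
      · subst hc
        rw [show PySem.Chars.splitOn.go ['\n'] (f+1) ('\n' :: t) cur acc
              = PySem.Chars.splitOn.go ['\n'] f t [] (cur.reverse :: acc) by
            simp [PySem.Chars.splitOn.go, List.isPrefixOf]]
        rw [ih f [] (cur.reverse :: acc) (by simpa using hf)]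
        cases h : linesNl t with
        | nil => exact absurd h (linesNl_ne_nil t)
        | cons L Ls => simp [linesNl, h]
      · rw [show PySem.Chars.splitOn.go ['\n'] (f+1) (c :: t) cur acc
              = PySem.Chars.splitOn.go ['\n'] f t (c :: cur) acc by
            simp [PySem.Chars.splitOn.go, List.isPrefixOf]
            exact fun h => absurd h.symm hc]
        rw [ih f (c :: cur) acc (by simpa using hf)]
        cases h : linesNl t with
        | nil => exact absurd h (linesNl_ne_nil t)
        | cons L Ls => simp [linesNl, h, hc]

theorem splitOn_eq_linesNl (s : List Char) :
    PySem.Chars.splitOn s ['\n'] = linesNl s := by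
  rw [PySem.Chars.splitOn, splitOn_go_eq s (s.length + 1) [] [] (by omega)]
  cases h : linesNl s with
  | nil => exact absurd h (linesNl_ne_nil s)
  | cons L Ls => simp

-- the predicate both programs count
def hodP (l : List Char) : Bool := ".data".toList.isPrefixOf l

-- hits contributed by the rest of the scan, given progress k on the current line
def cntFrom (k : Nat) (s : List Char) : Nat :=
  match linesNl s with
  | [] => 0
  | L :: Ls => (if k < 5 ∧ ".data".toList.drop k <+: L then 1 else 0) + Ls.countP hodP

theorem dfa_run (s : List Char) : ∀ (h : Int) (k : Nat),
    (s.foldl hodStep (h, k)).1 = h + (cntFrom k s : Int) := by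
  induction s with
  | nil =>
    intro h k
    have hnp : ¬ (k < 5 ∧ ".data".toList.drop k <+: ([] : List Char)) := by
      rintro ⟨h5, hp⟩
      have hlen : (".data".toList.drop k).length = 5 - k := by simp
      have he := congrArg List.length (List.prefix_nil.mp hp)
      rw [hlen] at he
      simp at he
      omega
    simp only [List.foldl_nil, cntFrom, linesNl, if_neg hnp]
    simp
  | cons c t ih =>
    intro h k
    cases ht : linesNl t with
    | nil => exact absurd ht (linesNl_ne_nil t)
    | cons L Ls =>
    by_cases hc : c = '\n'
    · subst hc
      simp only [List.foldl_cons]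
      rw [show hodStep (h, k) '\n' = (h, 0) from by simp [hodStep], ih h 0]
      have hne : ¬ (k < 5 ∧ ".data".toList.drop k <+: ([] : List Char)) := by
        rintro ⟨h5, hp⟩
        have hlen : (".data".toList.drop k).length = 5 - k := by simp
        have he := congrArg List.length (List.prefix_nil.mp hp)
        rw [hlen] at he
        simp at he
        omega
      simp only [cntFrom, show linesNl ('\n' :: t) = [] :: L :: Ls from by
        simp [linesNl, ht], ht, if_neg hne]
      simp [List.countP_cons, hodP, List.isPrefixOf_iff_prefix]
      split <;> omega
    · have hlines : linesNl (c :: t) = (c :: L) :: Ls := by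
        simp only [linesNl, if_neg hc, ht]
      have hlen5 : (".data".toList).length = 5 := rfl
      by_cases hk : k < 5
      · have hkl : k < (".data".toList).length := by omega
        have hdrop : ".data".toList.drop k
            = ".data".toList[k] :: ".data".toList.drop (k + 1) :=
          List.drop_eq_getElem_cons hkl
        by_cases hm : ".data".toList[k] = c
        · have hget : PySem.List.pyGet? ".data".toList (k : Int) = some c := by
            rw [PySem.List.pyGet?_natCast, List.getElem?_eq_getElem hkl, hm]
          simp only [List.foldl_cons]
          rw [show hodStep (h, k) c = (if k + 1 = 5 then h + 1 else h, k + 1) from by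
                rw [hodStep, if_neg hc, if_pos hk, if_pos hget], ih _ (k + 1)]
          have hguard : (k < 5 ∧ ".data".toList.drop k <+: (c :: L))
              ↔ (".data".toList.drop (k + 1) <+: L) := by
            rw [hdrop, hm]
            simp [hk, List.cons_prefix_cons]
          simp only [cntFrom, hlines, ht]
          by_cases h5 : k + 1 = 5
          · have hT : ".data".toList.drop (k + 1) <+: L := by
              rw [show ".data".toList.drop (k + 1) = [] from by rw [h5]; rfl]
              exact List.nil_prefix
            rw [if_pos h5, if_pos (hguard.mpr hT),
                if_neg (by rintro ⟨hx, _⟩; omega : ¬ (k + 1 < 5 ∧ ".data".toList.drop (k + 1) <+: L))]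
            push_cast
            ring
          · have hite : (if k + 1 < 5 ∧ ".data".toList.drop (k + 1) <+: L then 1 else 0)
                = (if k < 5 ∧ ".data".toList.drop k <+: (c :: L) then (1 : Nat) else 0) := by
              by_cases hP : ".data".toList.drop (k + 1) <+: L
              · rw [if_pos ⟨by omega, hP⟩, if_pos (hguard.mpr hP)]
              · rw [if_neg (by rintro ⟨_, hx⟩; exact hP hx),
                    if_neg (fun hx => hP (hguard.mp hx))]
            rw [if_neg h5, hite]
        · have hget : ¬ PySem.List.pyGet? ".data".toList (k : Int) = some c := by
            rw [PySem.List.pyGet?_natCast, List.getElem?_eq_getElem hkl]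
            simpa using hm
          simp only [List.foldl_cons]
          rw [show hodStep (h, k) c = (h, 6) from by
                rw [hodStep, if_neg hc, if_pos hk, if_neg hget], ih h 6]
          have hng : ¬ (k < 5 ∧ ".data".toList.drop k <+: (c :: L)) := by
            rintro ⟨_, hp⟩
            rw [hdrop] at hp
            exact hm (List.cons_prefix_cons.mp hp).1
          simp only [cntFrom, hlines, ht, if_neg hng,
            if_neg (by rintro ⟨hx, _⟩; omega : ¬ ((6 : Nat) < 5 ∧ ".data".toList.drop 6 <+: L))]
      · simp only [List.foldl_cons]
        rw [show hodStep (h, k) c = (h, k) from by rw [hodStep, if_neg hc, if_neg hk], ih h k]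
        simp only [cntFrom, hlines, ht,
          if_neg (by rintro ⟨hx, _⟩; omega : ¬ (k < 5 ∧ ".data".toList.drop k <+: L)),
          if_neg (by rintro ⟨hx, _⟩; omega : ¬ (k < 5 ∧ ".data".toList.drop k <+: (c :: L)))]

-- A's test line[:5] == ".data" is the prefix test
theorem slice5_eq_iff (line : List Char) :
    (PySem.Chars.slice line none (some 5) = ".data".toList) ↔ ".data".toList <+: line := by
  have hs : PySem.Chars.slice line none (some 5) = line.take (min 5 line.length) := by
    simp [PySem.Chars.slice_eq_listSlice, PySem.List.slice]
  rw [hs]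
  constructor
  · intro h
    exact h ▸ List.take_prefix _ _
  · intro h
    have h5 : (5 : Nat) ≤ line.length := by simpa using h.length_le
    rw [min_eq_left h5]
    simpa using (List.prefix_iff_eq_take.mp h).symm

-- A's loop body is the 0/1 count of hodP
theorem bodyA_eq (acc : Int) (line : List Char) :
    (if line = [] then acc
     else if PySem.List.pyGet? line 0 = some ';' then acc
     else if PySem.Chars.slice line none (some 5) = ".data".toList then acc + 1
     else acc)
    = if hodP line then acc + 1 else acc := by
  by_cases hp : hodP line
  · have hpre := List.isPrefixOf_iff_prefix.mp hp
    obtain ⟨r, hr⟩ := hpre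
    rw [if_pos hp, if_neg (by rw [← hr]; simp : ¬ line = []),
        if_neg (by
          have h0 : PySem.List.pyGet? line 0 = some '.' := by
            rw [← hr, show ".data".toList ++ r = '.' :: ("data".toList ++ r) from rfl]
            simp [PySem.List.pyGet?, PySem.List.pyIdx?]
            rw [if_pos (show (0 : Int) ≤ (r.length : Int) + 1 + 1 + 1 + 1 by omega)]
            rfl
          rw [h0]; simp : ¬ PySem.List.pyGet? line 0 = some ';'),
        if_pos ((slice5_eq_iff line).mpr ⟨r, hr⟩)]
  · rw [if_neg hp]
    have hsl : ¬ PySem.Chars.slice line none (some 5) = ".data".toList := by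
      intro hx
      exact hp (by simpa [hodP, List.isPrefixOf_iff_prefix] using (slice5_eq_iff line).mp hx)
    by_cases h0 : line = []
    · rw [if_pos h0]
    · rw [if_neg h0]
      by_cases h1 : PySem.List.pyGet? line 0 = some ';'
      · rw [if_pos h1]
      · rw [if_neg h1, if_neg hsl]

-- ===== VERDICT (by name: the statement is the Claim_ definition above) =====
theorem has_one_data_spec : Claim_equal_has_one_data := by
  intro code _
  simp only [Spec_has_one_data, has_one_data, has_one_data_alt]
  have hsplit : PySem.Chars.splitOn code.toList "\n".toList = linesNl code.toList := by
    simpa using splitOn_eq_linesNl code.toList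
  rw [hsplit]
  have hA : (linesNl code.toList).foldl (fun acc line =>
      if line = [] then acc
      else if PySem.List.pyGet? line 0 = some ';' then acc
      else if PySem.Chars.slice line none (some 5) = ".data".toList then acc + 1
      else acc) (0 : Int)
      = ((linesNl code.toList).countP hodP : Int) := by
    rw [show (fun (acc : Int) (line : List Char) =>
        if line = [] then acc
        else if PySem.List.pyGet? line 0 = some ';' then acc
        else if PySem.Chars.slice line none (some 5) = ".data".toList then acc + 1
        else acc) = (fun acc line => if hodP line then acc + 1 else acc) from by
      funext acc line; exact bodyA_eq acc line]
    simpa using PySem.List.foldl_if_add_one hodP (linesNl code.toList) 0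
  have hB : (code.toList.foldl hodStep (0, 0)).1
      = ((linesNl code.toList).countP hodP : Int) := by
    rw [dfa_run code.toList 0 0]
    cases ht : linesNl code.toList with
    | nil => exact absurd ht (linesNl_ne_nil code.toList)
    | cons L Ls =>
      simp [cntFrom, ht, List.countP_cons, hodP, List.isPrefixOf_iff_prefix]
      split <;> omega
  rw [hA, hB]
  by_cases h : ((linesNl code.toList).countP hodP : Int) > 1 <;> simp [h] <;> omega
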